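-- pv_equiv track=rewrite | github.com/candyasscoder/everfree-outpost | src/gen/tables/gen_border_shape_table.py | get_vertex_dir
-- ===== SOURCE A (Python) =====
-- BLOCK_CORNER = {
--         0: 'nw',
--         1: 'ne',
--         2: 'se',
--         3: 'sw',
--         }
--
-- def get_vertex_dir(bits):
--     blocks = tuple(i for i in range(4) if (bits & (1 << i)) != 0)
--
--     if len(blocks) == 0:
--         return 'outside'
--     elif len(blocks) == 1:
--         return 'corner/outer/' + BLOCK_CORNER[blocks[0]]
--     elif len(blocks) == 2:
--         dct = {
--                 (0, 2): 'cross/nw',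
--                 (1, 3): 'cross/ne',
--                 (0, 1): 'edge/n',
--                 (1, 2): 'edge/e',
--                 (2, 3): 'edge/s',
--                 (0, 3): 'edge/w',
--                 }
--         return dct[blocks]
--     elif len(blocks) == 3:
--         missing = {0, 1, 2, 3}.difference(blocks).pop()
--         return 'corner/inner/' + BLOCK_CORNER[(missing + 2) % 4]
--     elif len(blocks) == 4:
--         return 'center'
--     else:
--         assert False, 'unreachable'
-- ===== SOURCE B (Python) =====
-- SHAPE_TABLE = (
--     'outside', 'corner/outer/nw', 'corner/outer/ne', 'edge/n',
--     'corner/outer/se', 'cross/nw', 'edge/e', 'corner/inner/ne',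
--     'corner/outer/sw', 'edge/w', 'cross/ne', 'corner/inner/nw',
--     'edge/s', 'corner/inner/sw', 'corner/inner/se', 'center',
-- )
--
-- def get_vertex_dir(bits):
--     return SHAPE_TABLE[bits & 15]
-- ===== Notes on version B (the rewrite author's own statement) =====
-- stated objective: simpler
-- what changed: Replaced the blocks-tuple construction and count-based branching with inner dict lookups by a single precomputed sixteen-entry table indexed by the masked low four bits.
import Mathlib
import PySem

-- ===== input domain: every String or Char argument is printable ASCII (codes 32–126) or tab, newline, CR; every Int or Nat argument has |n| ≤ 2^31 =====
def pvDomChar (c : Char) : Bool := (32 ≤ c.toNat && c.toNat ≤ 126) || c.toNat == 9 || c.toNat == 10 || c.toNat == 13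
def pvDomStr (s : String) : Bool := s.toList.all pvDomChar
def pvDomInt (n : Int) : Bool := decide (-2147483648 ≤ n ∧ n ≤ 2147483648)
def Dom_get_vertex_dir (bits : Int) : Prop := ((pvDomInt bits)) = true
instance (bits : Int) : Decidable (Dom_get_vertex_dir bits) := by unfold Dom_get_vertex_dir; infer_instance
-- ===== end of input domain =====

-- B replaces A's blocks-tuple construction and count-based branching by one precomputed sixteen-entry table indexed by bits & 15 (simpler).

-- ===== PORT A =====
def BLOCK_CORNER : PySem.Dict Int String :=
  PySem.Dict.ofList [(0, "nw"), (1, "ne"), (2, "se"), (3, "sw")]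

def get_vertex_dir (bits : Int) : String :=
  let blocks : List Int :=
    (PySem.List.pyRange 0 4 1).filter (fun i => PySem.Int.band bits (1 <<< i.toNat) != 0)
  if blocks.length = 0 then "outside"
  else if blocks.length = 1 then
    -- BLOCK_CORNER[blocks[0]]: the key is always present (blocks[0] ∈ 0..3), so getD "" never fires
    "corner/outer/" ++ (PySem.Dict.get? BLOCK_CORNER (blocks.headD 0)).getD ""
  else if blocks.length = 2 then
    let dct : PySem.Dict (Int × Int) String :=
      PySem.Dict.ofList [((0, 2), "cross/nw"), ((1, 3), "cross/ne"), ((0, 1), "edge/n"),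
                         ((1, 2), "edge/e"), ((2, 3), "edge/s"), ((0, 3), "edge/w")]
    -- dct[blocks]: every ascending 2-subset of {0,1,2,3} is a key, so getD "" never fires
    (PySem.Dict.get? dct (blocks.headD 0, blocks.getD 1 0)).getD ""
  else if blocks.length = 3 then
    -- {0,1,2,3}.difference(blocks).pop(): the difference is a singleton, pop takes its element
    let missing := (PySem.Set.diff (PySem.Set.ofList [0, 1, 2, 3]) blocks).headD 0
    "corner/inner/" ++ (PySem.Dict.get? BLOCK_CORNER (PySem.Int.mod (missing + 2) 4)).getD ""
  else if blocks.length = 4 then "center"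
  else ""  -- assert False: unreachable (blocks ⊆ range(4))

-- ===== PORT B =====
def SHAPE_TABLE : List String :=
  ["outside", "corner/outer/nw", "corner/outer/ne", "edge/n",
   "corner/outer/se", "cross/nw", "edge/e", "corner/inner/ne",
   "corner/outer/sw", "edge/w", "cross/ne", "corner/inner/nw",
   "edge/s", "corner/inner/sw", "corner/inner/se", "center"]

def get_vertex_dir_alt (bits : Int) : String :=
  -- SHAPE_TABLE[bits & 15]: the index is always in 0..15, so getD "" never fires
  (PySem.List.pyGet? SHAPE_TABLE (PySem.Int.band bits 15)).getD ""

-- ===== PRECONDITION & SPEC =====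
def Spec_get_vertex_dir (bits : Int) (out : String) : Prop := out = get_vertex_dir_alt bits
instance (bits : Int) (out : String) : Decidable (Spec_get_vertex_dir bits out) := by unfold Spec_get_vertex_dir; infer_instance

-- ===== CLAIM (what is proved, stated in full; the proofs are below) =====
def Claim_equal_get_vertex_dir : Prop := ∀ (bits : Int), Dom_get_vertex_dir bits → Spec_get_vertex_dir bits (get_vertex_dir bits)

-- ===== LEMMAS AND PROOFS =====

theorem pv_nat_and_mod (x k : Nat) (hk : k < 16) : x &&& k = x % 16 &&& k := by
  have h1 : x &&& k < 16 := lt_of_le_of_lt Nat.and_le_right hk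
  calc x &&& k = (x &&& k) % 16 := (Nat.mod_eq_of_lt h1).symm
    _ = (x % 16) &&& (k % 16) := by
          have h := @Nat.and_mod_two_pow x k 4
          norm_num at h
          exact h
    _ = x % 16 &&& k := by rw [Nat.mod_eq_of_lt hk]

theorem pv_small_bits : ∀ m' < 16, ∀ k < 16, k - (k &&& m') = (15 - m') &&& k := by decide

theorem pv_band_emod16 (a n : Int) (h0 : 0 ≤ n) (hn : n < 16) :
    PySem.Int.band a n = PySem.Int.band (a % 16) n := by
  have h2 : (0 : Int) ≤ a % 16 := Int.emod_nonneg a (by norm_num)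
  have h3 : a % 16 < 16 := Int.emod_lt_of_pos a (by norm_num)
  by_cases ha : 0 ≤ a
  · rw [PySem.Int.band_of_nonneg ha h0, PySem.Int.band_of_nonneg h2 h0]
    congr 1
    have hh : (a.toNat : Int) = a := Int.toNat_of_nonneg ha
    have h5 : a % 16 = ((a.toNat % 16 : Nat) : Int) := by push_cast; omega
    have hmod : (a % 16).toNat = a.toNat % 16 := by rw [h5, Int.toNat_natCast]
    rw [hmod]
    exact pv_nat_and_mod a.toNat n.toNat (by omega)
  · rw [PySem.Int.band_of_nonneg h2 h0]
    have hlhs : PySem.Int.band a n = ((n.toNat - (n.toNat &&& (-a - 1).toNat) : Nat) : Int) := by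
      simp [PySem.Int.band, ha, h0]
    rw [hlhs]
    congr 1
    have hh : ((-a - 1).toNat : Int) = -a - 1 := Int.toNat_of_nonneg (by omega)
    have h6 : ((-a - 1).toNat % 16 : Nat) < 16 := Nat.mod_lt _ (by norm_num)
    have h5 : a % 16 = ((15 - (-a - 1).toNat % 16 : Nat) : Int) := by omega
    have hr : (a % 16).toNat = 15 - (-a - 1).toNat % 16 := by rw [h5, Int.toNat_natCast]
    rw [hr]
    have hswap : n.toNat &&& (-a - 1).toNat = n.toNat &&& (-a - 1).toNat % 16 := by
      rw [Nat.and_comm, pv_nat_and_mod _ n.toNat (by omega), Nat.and_comm]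
    rw [hswap]
    exact pv_small_bits ((-a - 1).toNat % 16) (Nat.mod_lt _ (by norm_num)) n.toNat (by omega)

theorem pv_pyRange04 : PySem.List.pyRange 0 4 1 = [0, 1, 2, 3] := by decide

theorem get_vertex_dir_emod (bits : Int) :
    get_vertex_dir bits = get_vertex_dir (bits % 16) := by
  have hp : ∀ i ∈ PySem.List.pyRange 0 4 1,
      (PySem.Int.band bits (1 <<< i.toNat) != 0)
        = (PySem.Int.band (bits % 16) (1 <<< i.toNat) != 0) := by
    intro i hi
    rw [pv_pyRange04] at hi
    have h4 : (0 : Int) ≤ 1 <<< i.toNat ∧ (1 : Int) <<< i.toNat < 16 := by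
      simp only [List.mem_cons, List.not_mem_nil, or_false] at hi
      rcases hi with rfl | rfl | rfl | rfl <;> decide
    rw [pv_band_emod16 bits _ h4.1 h4.2]
  have hmm : (bits % 16) % 16 = bits % 16 := Int.emod_emod_of_dvd bits dvd_rfl
  simp only [get_vertex_dir, List.filter_congr hp]

theorem get_vertex_dir_alt_emod (bits : Int) :
    get_vertex_dir_alt bits = get_vertex_dir_alt (bits % 16) := by
  simp only [get_vertex_dir_alt, pv_band_emod16 bits 15 (by norm_num) (by norm_num)]

-- ===== VERDICT (by name: the statement is the Claim_ definition above) =====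
theorem get_vertex_dir_spec : Claim_equal_get_vertex_dir := by
  intro bits _
  unfold Spec_get_vertex_dir
  rw [get_vertex_dir_emod, get_vertex_dir_alt_emod]
  have h0 : 0 ≤ bits % 16 := Int.emod_nonneg bits (by norm_num)
  have h1 : bits % 16 < 16 := Int.emod_lt_of_pos bits (by norm_num)
  interval_cases h : bits % 16 <;> decide
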